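-- pv_equiv track=rewrite | github.com/thandrasatish/DSA-160 | prefixSum/Number_of_times_graph_cuts_x-axis.py | grapcuts
-- ===== SOURCE A (Python) =====
-- def grapcuts(arr):
--     n = len(arr)
--     prev = 0
--     res = 0
--     curr = 0
--     for i in range(n):
--         prev = curr
--         curr += arr[i]
--
--         if((prev <0 and curr>=0) or (prev>0 and curr<=0)):
--             res += 1
--     return res
-- ===== SOURCE B (Python) =====
-- def grapcuts(arr):
--     # Divide and conquer: rec(xs, base) returns (number of x-axis crossings of
--     # the prefix sums of xs started at base, base + sum(xs)); halves combine by
--     # threading the left half's end-sum into the right half.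
--     def rec(xs, base):
--         if len(xs) <= 1:
--             c = base + sum(xs)
--             return (1 if (base < 0 <= c) or (base > 0 >= c) else 0), c
--         mid = len(xs) // 2
--         c1, s1 = rec(xs[:mid], base)
--         c2, s2 = rec(xs[mid:], s1)
--         return c1 + c2, s2
--     return rec(arr, 0)[0]
-- ===== Notes on version B (the rewrite author's own statement) =====
-- stated objective: alternative
-- what changed: Replaces A's single fused left-to-right loop with a divide-and-conquer tree recursion: split the array in half, recursively compute (crossing count, end prefix sum) for each half, and combine by threading the left half's end-sum as the right half's starting offset.
import Mathlib
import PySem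

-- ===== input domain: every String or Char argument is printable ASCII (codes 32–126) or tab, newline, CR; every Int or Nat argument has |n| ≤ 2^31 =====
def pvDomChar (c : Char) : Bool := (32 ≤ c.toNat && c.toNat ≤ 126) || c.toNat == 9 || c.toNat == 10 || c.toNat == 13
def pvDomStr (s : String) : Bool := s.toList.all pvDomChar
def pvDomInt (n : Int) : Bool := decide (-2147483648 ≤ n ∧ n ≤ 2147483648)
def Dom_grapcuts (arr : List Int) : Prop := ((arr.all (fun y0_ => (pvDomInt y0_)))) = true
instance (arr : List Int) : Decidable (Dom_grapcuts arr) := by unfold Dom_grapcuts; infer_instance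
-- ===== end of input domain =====

-- B replaces A's fused prev/curr/res loop by a divide-and-conquer recursion combining (crossing count, end prefix sum) over halves (alternative decomposition, same value).


-- ===== PORT A =====
def grapcuts (arr : List Int) : Int :=
  let n : Int := arr.length
  -- state (prev, res, curr)
  let st := (PySem.List.pyRange 0 n 1).foldl
    (fun (st : Int × Int × Int) i =>
      let prev := st.2.2
      let curr := st.2.2 + PySem.List.pyGetD arr i 0
      let res := if (prev < 0 ∧ 0 ≤ curr) ∨ (0 < prev ∧ curr ≤ 0) then st.2.1 + 1 else st.2.1
      (prev, res, curr)) ((0 : Int), (0 : Int), (0 : Int))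
  st.2.1

-- ===== PORT B =====
-- rec(xs, base): Python's xs[:mid] / xs[mid:] with mid = len(xs)//2 are take/drop (0 ≤ mid ≤ len, exact here)
def grapcutsRec (xs : List Int) (base : Int) : Int × Int :=
  if _h : xs.length ≤ 1 then
    let c := base + xs.sum
    ((if (base < 0 ∧ 0 ≤ c) ∨ (0 < base ∧ c ≤ 0) then 1 else 0), c)
  else
    let mid := xs.length / 2
    let p1 := grapcutsRec (xs.take mid) base
    let p2 := grapcutsRec (xs.drop mid) p1.2
    (p1.1 + p2.1, p2.2)
termination_by xs.length
decreasing_by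
  · simp only [List.length_take]; omega
  · simp only [List.length_drop]; omega

def grapcuts_alt (arr : List Int) : Int :=
  (grapcutsRec arr 0).1

-- ===== PRECONDITION & SPEC =====
def Spec_grapcuts (arr : List Int) (out : Int) : Prop := out = grapcuts_alt arr
instance (arr : List Int) (out : Int) : Decidable (Spec_grapcuts arr out) := by unfold Spec_grapcuts; infer_instance

-- ===== CLAIM (what is proved, stated in full; the proofs are below) =====
def Claim_equal_grapcuts : Prop := ∀ (arr : List Int), Dom_grapcuts arr → Spec_grapcuts arr (grapcuts arr)

-- ===== LEMMAS AND PROOFS =====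

-- reference: number of crossings along the partial sums starting at c
def pvCnt (c : Int) : List Int → Int
  | [] => 0
  | x :: xs => (if (c < 0 ∧ 0 ≤ c + x) ∨ (0 < c ∧ c + x ≤ 0) then 1 else 0) + pvCnt (c + x) xs

-- A's loop computes pvCnt
lemma a_loop (xs : List Int) : ∀ (p r c : Int),
    (xs.foldl (fun (st : Int × Int × Int) x =>
      let prev := st.2.2
      let curr := st.2.2 + x
      let res := if (prev < 0 ∧ 0 ≤ curr) ∨ (0 < prev ∧ curr ≤ 0) then st.2.1 + 1 else st.2.1
      (prev, res, curr)) (p, r, c)).2.1 = r + pvCnt c xs := by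
  induction xs with
  | nil => intro p r c; simp [pvCnt]
  | cons x xs ih =>
    intro p r c
    simp only [List.foldl_cons, pvCnt, ih]
    split_ifs <;> ring

-- crossings compose over concatenation, threading the running sum
lemma pvCnt_append (xs : List Int) : ∀ (ys : List Int) (c : Int),
    pvCnt c (xs ++ ys) = pvCnt c xs + pvCnt (c + xs.sum) ys := by
  induction xs with
  | nil => intro ys c; simp [pvCnt]
  | cons x xs ih =>
    intro ys c
    simp only [List.cons_append, pvCnt, ih, List.sum_cons]
    ring_nf

-- B's recursion computes (pvCnt, end sum)
lemma rec_eq (n : Nat) : ∀ (xs : List Int) (base : Int), xs.length ≤ n →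
    grapcutsRec xs base = (pvCnt base xs, base + xs.sum) := by
  induction n with
  | zero =>
    intro xs base h
    have : xs = [] := List.eq_nil_of_length_eq_zero (Nat.le_zero.mp h)
    subst this
    rw [grapcutsRec]
    simp [pvCnt]
  | succ n ih =>
    intro xs base h
    rw [grapcutsRec]
    by_cases h1 : xs.length ≤ 1
    · rw [dif_pos h1]
      match xs, h1 with
      | [], _ => simp [pvCnt]
      | [x], _ => simp [pvCnt]
    · rw [dif_neg h1]
      have hmidle : xs.length / 2 ≤ xs.length := Nat.div_le_self _ _
      have ht : (xs.take (xs.length / 2)).length ≤ n := by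
        simp only [List.length_take]; omega
      have hd : (xs.drop (xs.length / 2)).length ≤ n := by
        simp only [List.length_drop]; omega
      simp only [ih _ _ ht, ih _ _ hd]
      have hsplit : xs.take (xs.length / 2) ++ xs.drop (xs.length / 2) = xs :=
        List.take_append_drop _ _
      conv_rhs => rw [← hsplit]
      rw [pvCnt_append, List.sum_append]
      simp [add_assoc]

-- ===== VERDICT (by name: the statement is the Claim_ definition above) =====
theorem grapcuts_spec : Claim_equal_grapcuts := by
  intro arr _
  unfold Spec_grapcuts grapcuts grapcuts_alt
  simp only []
  rw [PySem.List.foldl_pyRange_zero_pyGetD' arr 0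
    (fun (st : Int × Int × Int) x =>
      let prev := st.2.2
      let curr := st.2.2 + x
      let res := if (prev < 0 ∧ 0 ≤ curr) ∨ (0 < prev ∧ curr ≤ 0) then st.2.1 + 1 else st.2.1
      (prev, res, curr)) ((0 : Int), (0 : Int), (0 : Int))]
  rw [a_loop, rec_eq arr.length arr 0 le_rfl]
  ring
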